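-- pv_equiv track=rewrite | github.com/subhiksharani/Data-Mining | HW2/subhiksha_rani_task1.py | generate2pair
-- ===== SOURCE A (Python) =====
-- def generate2pair(items):
--     two_pairs = list()
--     for i in items:
--         for j in items:
--             if j > i:
--                 if (i, j) not in two_pairs:
--                     two_pairs.append((i, j))
--     return two_pairs
-- ===== SOURCE B (Python) =====
-- def generate2pair(items):
--     # dedup once in first-appearance order, then emit pairs without any membership check
--     u = []
--     for x in items:
--         if x not in u:
--             u.append(x)
--     return [(i, j) for i in u for j in u if j > i]
-- ===== Notes on version B (the rewrite author's own statement) =====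
-- stated objective: faster
-- what changed: B deduplicates the items once (first-appearance order) and then emits all pairs (i,j) with j>i from the unique list with no membership test on the growing result list.
import Mathlib
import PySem

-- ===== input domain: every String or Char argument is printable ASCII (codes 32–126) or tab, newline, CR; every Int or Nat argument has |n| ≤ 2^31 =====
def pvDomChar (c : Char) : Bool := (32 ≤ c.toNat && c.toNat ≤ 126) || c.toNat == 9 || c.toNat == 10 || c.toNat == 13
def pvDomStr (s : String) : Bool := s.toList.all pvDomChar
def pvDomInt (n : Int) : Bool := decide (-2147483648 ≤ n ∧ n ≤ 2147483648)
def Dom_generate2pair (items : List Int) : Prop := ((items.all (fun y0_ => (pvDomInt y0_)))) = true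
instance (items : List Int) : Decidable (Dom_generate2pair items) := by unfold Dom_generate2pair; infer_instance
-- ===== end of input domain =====

-- B deduplicates once up front (first-appearance order) and then emits pairs with no
-- membership test on the growing result list: faster, and the same output.

-- ===== PORT A =====
def generate2pair (items : List Int) : List (Int × Int) :=
  items.foldl (fun acc i =>
    items.foldl (fun a j =>
      if j > i then (if (i, j) ∈ a then a else a ++ [(i, j)]) else a) acc) []

-- ===== PORT B =====
def generate2pair_alt (items : List Int) : List (Int × Int) :=
  let u := items.foldl (fun s x => if x ∈ s then s else s ++ [x]) []
  u.flatMap (fun i => (u.filter (fun j => j > i)).map (fun j => (i, j)))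

-- ===== PRECONDITION & SPEC =====
def Spec_generate2pair (items : List Int) (out : List (Int × Int)) : Prop := out = generate2pair_alt items
instance (items : List Int) (out : List (Int × Int)) : Decidable (Spec_generate2pair items out) := by unfold Spec_generate2pair; infer_instance

-- ===== CLAIM (what is proved, stated in full; the proofs are below) =====
def Claim_equal_generate2pair : Prop := ∀ (items : List Int), Dom_generate2pair items → Spec_generate2pair items (generate2pair items)

-- ===== LEMMAS AND PROOFS =====

-- order-preserving dedup with a "seen" accumulator (recursive form of B's first pass)
def pvSel (seen : List Int) : List Int → List Int
  | [] => []
  | x :: t => if x ∈ seen then pvSel seen t else x :: pvSel (seen ++ [x]) t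

-- what A's inner loop over `l` picks for left component `i`, given already-picked js `seen`
def pvSelGT (i : Int) (seen : List Int) : List Int → List Int
  | [] => []
  | j :: t => if i < j ∧ j ∉ seen then j :: pvSelGT i (seen ++ [j]) t else pvSelGT i seen t

-- second components of the pairs of `a` whose first component is `i`
def pvJs (i : Int) (a : List (Int × Int)) : List Int :=
  a.filterMap (fun p => if p.1 = i then some p.2 else none)

-- B's unique list and its per-i row of pairs
def pvU (items : List Int) : List Int := pvSel [] items

def pvR (items : List Int) (i : Int) : List (Int × Int) :=
  ((pvU items).filter (fun j => i < j)).map (fun j => (i, j))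

lemma foldl_uniq (l u : List Int) :
    l.foldl (fun s x => if x ∈ s then s else s ++ [x]) u = u ++ pvSel u l := by
  induction l generalizing u with
  | nil => simp [pvSel]
  | cons x t ih =>
    by_cases h : x ∈ u
    · simp [pvSel, h, List.foldl_cons, ih]
    · simp [pvSel, h, List.foldl_cons, ih (u ++ [x])]

lemma mem_js (i j : Int) (a : List (Int × Int)) : (i, j) ∈ a ↔ j ∈ pvJs i a := by
  simp only [pvJs, List.mem_filterMap]
  constructor
  · intro h; exact ⟨(i, j), h, by simp⟩
  · rintro ⟨⟨p1, p2⟩, hp, he⟩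
    by_cases h1 : p1 = i
    · simp [h1] at he; simpa [h1, he] using hp
    · simp [h1] at he

lemma js_append (i : Int) (a b : List (Int × Int)) :
    pvJs i (a ++ b) = pvJs i a ++ pvJs i b := by
  simp [pvJs]

lemma js_row (x i : Int) (g : List Int) :
    pvJs x (g.map (fun j => (i, j))) = if i = x then g else [] := by
  by_cases h : i = x <;> simp [pvJs, List.filterMap_map, Function.comp, h]

lemma inner_eq (i : Int) (l : List Int) : ∀ (acc : List (Int × Int)),
    l.foldl (fun a j => if j > i then (if (i, j) ∈ a then a else a ++ [(i, j)]) else a) acc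
      = acc ++ (pvSelGT i (pvJs i acc) l).map (fun j => (i, j)) := by
  induction l with
  | nil => intro acc; simp [pvSelGT]
  | cons j t ih =>
    intro acc
    by_cases hgt : i < j
    · by_cases hmem : (i, j) ∈ acc
      · have hjs : j ∈ pvJs i acc := (mem_js i j acc).1 hmem
        simp only [List.foldl_cons, gt_iff_lt, hgt, if_pos, hmem]
        rw [ih acc]
        simp [pvSelGT, hgt, hjs]
      · have hjs : j ∉ pvJs i acc := fun h => hmem ((mem_js i j acc).2 h)
        simp only [List.foldl_cons, gt_iff_lt, hgt, if_pos, hmem, if_false]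
        rw [ih (acc ++ [(i, j)])]
        have : pvJs i (acc ++ [(i, j)]) = pvJs i acc ++ [j] := by
          simp [pvJs]
        rw [this]
        simp [pvSelGT, hgt, hjs]
    · simp only [List.foldl_cons, gt_iff_lt, hgt, if_false]
      rw [ih acc]
      simp [pvSelGT, hgt]

lemma selGT_nil (i : Int) : ∀ (l seen : List Int),
    (∀ j ∈ l, i < j → j ∈ seen) → pvSelGT i seen l = [] := by
  intro l
  induction l with
  | nil => intro seen _; rfl
  | cons j t ih =>
    intro seen h
    have : ¬ (i < j ∧ j ∉ seen) := by
      rintro ⟨h1, h2⟩; exact h2 (h j (by simp) h1)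
    simp only [pvSelGT, if_neg this]
    exact ih seen (fun j' hj' => h j' (by simp [hj']))

lemma selGT_filter (i : Int) : ∀ (l seen seen' : List Int),
    (∀ j, i < j → (j ∈ seen ↔ j ∈ seen')) →
    pvSelGT i seen l = (pvSel seen' l).filter (fun j => i < j) := by
  intro l
  induction l with
  | nil => intro seen seen' _; rfl
  | cons x t ih =>
    intro seen seen' hcorr
    by_cases hs : x ∈ seen'
    · have hcond : ¬ (i < x ∧ x ∉ seen) := by
        rintro ⟨h1, h2⟩; exact h2 ((hcorr x h1).2 hs)
      simp only [pvSelGT, if_neg hcond, pvSel, if_pos hs]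
      exact ih seen seen' hcorr
    · by_cases hlt : i < x
      · have hns : x ∉ seen := fun h => hs ((hcorr x hlt).1 h)
        have hcorr' : ∀ j, i < j → (j ∈ seen ++ [x] ↔ j ∈ seen' ++ [x]) := by
          intro j hj; simp [hcorr j hj]
        simp only [pvSelGT, if_pos (show i < x ∧ x ∉ seen from ⟨hlt, hns⟩), pvSel,
          if_neg hs, List.filter_cons]
        rw [ih (seen ++ [x]) (seen' ++ [x]) hcorr']
        simp [hlt]
      · have hcond : ¬ (i < x ∧ x ∉ seen) := fun h => hlt h.1
        have hcorr' : ∀ j, i < j → (j ∈ seen ↔ j ∈ seen' ++ [x]) := by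
          intro j hj
          rw [hcorr j hj]
          simp only [List.mem_append, List.mem_singleton]
          constructor
          · exact Or.inl
          · rintro (h | rfl)
            · exact h
            · exact absurd hj hlt
        simp only [pvSelGT, if_neg hcond, pvSel, if_neg hs, List.filter_cons]
        rw [ih seen (seen' ++ [x]) hcorr']
        simp [hlt]

lemma mem_sel : ∀ (l seen : List Int) (x : Int), x ∈ l → x ∈ seen ∨ x ∈ pvSel seen l := by
  intro l
  induction l with
  | nil => intro seen x h; simp at h
  | cons y t ih =>
    intro seen x hx
    by_cases hy : y ∈ seen
    · simp only [pvSel, if_pos hy]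
      rcases List.mem_cons.1 hx with h | h
      · exact Or.inl (h ▸ hy)
      · exact ih seen x h
    · simp only [pvSel, if_neg hy]
      rcases List.mem_cons.1 hx with h | h
      · exact Or.inr (by simp [h])
      · rcases ih (seen ++ [y]) x h with h' | h'
        · rcases List.mem_append.1 h' with h'' | h''
          · exact Or.inl h''
          · exact Or.inr (by simp at h''; simp [h''])
        · exact Or.inr (by simp [h'])

lemma mem_u (items : List Int) (x : Int) (h : x ∈ items) : x ∈ pvU items := by
  rcases mem_sel items [] x h with h' | h'
  · simp at h'
  · exact h'

lemma flatMap_none (x : Int) (f : List Int) : ∀ (S : List Int), (∀ i' ∈ S, i' ≠ x) →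
    (S.flatMap (fun i' => if i' = x then f else [])) = [] := by
  intro S
  induction S with
  | nil => intro _; rfl
  | cons a S' ih =>
    intro h
    simp only [List.flatMap_cons, if_neg (h a (by simp)), List.nil_append]
    exact ih (fun i' hi' => h i' (by simp [hi']))

lemma flatMap_single (x : Int) (f : List Int) : ∀ (S : List Int), S.Nodup → x ∈ S →
    (S.flatMap (fun i' => if i' = x then f else [])) = f := by
  intro S
  induction S with
  | nil => intro _ h; simp at h
  | cons a S' ih =>
    intro hnd hx
    rcases List.mem_cons.1 hx with h | h
    · have hax : a = x := h.symm
      have hna : ∀ i' ∈ S', i' ≠ x := fun i' hi' he =>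
        (List.nodup_cons.1 hnd).1 (hax ▸ he ▸ hi')
      rw [List.flatMap_cons, if_pos hax, flatMap_none x f S' hna]
      simp
    · have hne : a ≠ x := fun he => (List.nodup_cons.1 hnd).1 (he ▸ h)
      simp only [List.flatMap_cons, if_neg hne, List.nil_append]
      exact ih (List.nodup_cons.1 hnd).2 h

lemma js_acc (items : List Int) (x : Int) (S : List Int) :
    pvJs x (S.flatMap (pvR items)) =
      S.flatMap (fun i' => if i' = x then (pvU items).filter (fun j => x < j) else []) := by
  induction S with
  | nil => rfl
  | cons a S' ih =>
    simp only [List.flatMap_cons, js_append, ih]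
    congr 1
    rw [pvR, js_row]
    by_cases h : a = x <;> simp [h]

lemma outer_inv (items : List Int) : ∀ (l S : List Int), S.Nodup → (∀ x ∈ l, x ∈ items) →
    l.foldl (fun acc i =>
      items.foldl (fun a j =>
        if j > i then (if (i, j) ∈ a then a else a ++ [(i, j)]) else a) acc)
      (S.flatMap (pvR items))
    = (S ++ pvSel S l).flatMap (pvR items) := by
  intro l
  induction l with
  | nil => intro S _ _; simp [pvSel]
  | cons x t ih =>
    intro S hnd hsub
    have hxitems : x ∈ items := hsub x (by simp)
    simp only [List.foldl_cons]
    rw [inner_eq x items (S.flatMap (pvR items)), js_acc]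
    by_cases hx : x ∈ S
    · rw [flatMap_single x _ S hnd hx]
      rw [selGT_nil x items _ (fun j hj hlt => by
        simp only [List.mem_filter, decide_eq_true_eq]
        exact ⟨mem_u items j hj, hlt⟩)]
      simp only [List.map_nil, List.append_nil]
      rw [ih S hnd (fun y hy => hsub y (by simp [hy]))]
      simp [pvSel, hx]
    · rw [flatMap_none x _ S (fun i' hi' he => hx (he ▸ hi'))]
      rw [selGT_filter x items [] [] (fun j _ => Iff.rfl)]
      have hrow : (S.flatMap (pvR items)) ++
          ((pvSel [] items).filter (fun j => x < j)).map (fun j => (x, j))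
          = (S ++ [x]).flatMap (pvR items) := by
        simp [pvR, pvU]
      rw [hrow]
      have hnd' : (S ++ [x]).Nodup := by
        exact hnd.append (List.nodup_singleton x)
          (fun a ha hb => hx (by simp only [List.mem_singleton] at hb; exact hb ▸ ha))
      rw [ih (S ++ [x]) hnd' (fun y hy => hsub y (by simp [hy]))]
      simp [pvSel, hx, List.append_assoc]

-- ===== VERDICT (by name: the statement is the Claim_ definition above) =====
theorem generate2pair_spec : Claim_equal_generate2pair := by
  intro items _
  unfold Spec_generate2pair generate2pair generate2pair_alt
  have h := outer_inv items items [] (by simp) (fun x hx => hx)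
  simp only [List.flatMap_nil, List.nil_append] at h
  rw [h, foldl_uniq items]
  simp only [List.nil_append]
  unfold pvR pvU
  rfl
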